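-- pv_equiv track=rewrite | github.com/base-de-datos2/proyecto_2 | creacion_del_indice.py | create_tf_query
-- ===== SOURCE A (Python) =====
-- def create_tf_query(query_tokens):
--     query_tf = {}
--     for tok in query_tokens:
--         if query_tf.get(tok):
--             query_tf[tok] += 1
--         else:
--             query_tf[tok] = 1
--
--     return (sorted(query_tf.keys()),query_tf)
-- ===== SOURCE B (Python) =====
-- def create_tf_query(query_tokens):
--     query_tf = {tok: query_tokens.count(tok) for tok in dict.fromkeys(query_tokens)}
--     return (sorted(query_tf), query_tf)
-- ===== Notes on version B (the rewrite author's own statement) =====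
-- stated objective: idiomatic
-- what changed: Replaces A's incremental per-token counter loop by a single dict comprehension over the distinct tokens (dict.fromkeys dedup) that counts each one with list.count.
import Mathlib
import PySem

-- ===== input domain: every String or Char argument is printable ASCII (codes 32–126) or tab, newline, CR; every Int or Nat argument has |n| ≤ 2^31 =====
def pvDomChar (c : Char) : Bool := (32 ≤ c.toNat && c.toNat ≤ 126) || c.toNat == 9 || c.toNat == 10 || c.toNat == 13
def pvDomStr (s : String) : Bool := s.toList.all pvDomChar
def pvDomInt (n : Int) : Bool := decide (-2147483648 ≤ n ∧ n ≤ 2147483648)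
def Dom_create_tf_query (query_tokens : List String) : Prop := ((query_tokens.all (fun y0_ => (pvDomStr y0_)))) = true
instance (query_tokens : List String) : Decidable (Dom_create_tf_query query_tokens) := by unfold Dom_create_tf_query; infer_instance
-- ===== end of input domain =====

-- B replaces A's incremental counter loop by one comprehension over the distinct
-- tokens counting each with list.count (objective: idiomatic, same results).

-- ===== PORT A =====
-- one loop iteration: 'if query_tf.get(tok): query_tf[tok] += 1 else: query_tf[tok] = 1'
-- ('.get(tok)' truthiness: none and 0 are falsy)
def createTfStep (d : PySem.Dict String Int) (tok : String) : PySem.Dict String Int :=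
  match d.get? tok with
  | some v => if v ≠ 0 then d.insert tok (v + 1) else d.insert tok 1
  | none => d.insert tok 1

def create_tf_query (query_tokens : List String) : List String × (List (String × Int)) :=
  let query_tf := query_tokens.foldl createTfStep PySem.Dict.empty
  (PySem.List.sorted query_tf.keys (fun x => x) false, query_tf.items)

-- ===== PORT B =====
-- '{tok: query_tokens.count(tok) for tok in dict.fromkeys(query_tokens)}': the
-- comprehension's keys are distinct, so the dict it builds is this association list
def create_tf_query_alt (query_tokens : List String) : List String × (List (String × Int)) :=
  let query_tf := (PySem.List.dedup query_tokens).map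
    (fun tok => (tok, (PySem.List.count query_tokens tok : Int)))
  (PySem.List.sorted (query_tf.map Prod.fst) (fun x => x) false, query_tf)

-- ===== PRECONDITION & SPEC =====
def Spec_create_tf_query (query_tokens : List String) (out : List String × (List (String × Int))) : Prop := out = create_tf_query_alt query_tokens
instance (query_tokens : List String) (out : List String × (List (String × Int))) : Decidable (Spec_create_tf_query query_tokens out) := by unfold Spec_create_tf_query; infer_instance

-- ===== CLAIM =====
def Claim_equal_create_tf_query : Prop := ∀ (query_tokens : List String), Dom_create_tf_query query_tokens → Spec_create_tf_query query_tokens (create_tf_query query_tokens)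

-- ===== LEMMAS AND PROOFS =====

-- A's loop never stores a non-positive value, so its step is the plain 'd[x] = d.get(x,0)+1' step.
theorem createTf_fold_eq_counter_fold (xs : List String) (d : PySem.Dict String Int)
    (hpos : ∀ k v, d.get? k = some v → 0 < v) :
    xs.foldl createTfStep d = xs.foldl (fun d x => d.insert x (d.getD x 0 + 1)) d := by
  induction xs generalizing d with
  | nil => rfl
  | cons x xs ih =>
    have hstep : createTfStep d x = d.insert x (d.getD x 0 + 1) := by
      unfold createTfStep
      cases h : d.get? x with
      | none => simp [PySem.Dict.getD_of_get?_eq_none d _ h]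
      | some v =>
        have hv : 0 < v := hpos _ _ h
        simp [PySem.Dict.getD_of_get?_eq_some d _ h]
        intro hv0; omega
    simp only [List.foldl_cons, hstep]
    exact ih _ (by
      intro k v hkv
      rw [PySem.Dict.get?_insert] at hkv
      split_ifs at hkv with hk
      · have hd0 : (0:Int) ≤ d.getD x 0 := by
          cases h : d.get? x with
          | none => simp [PySem.Dict.getD_of_get?_eq_none d _ h]
          | some w => have := hpos _ _ h; simp [PySem.Dict.getD_of_get?_eq_some d _ h]; omega
        have : d.getD x 0 + 1 = v := Option.some.inj hkv
        omega
      · exact hpos _ _ hkv)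

theorem createTf_fold_eq_counter (xs : List String) :
    xs.foldl createTfStep PySem.Dict.empty = PySem.Dict.counter xs := by
  rw [createTf_fold_eq_counter_fold xs PySem.Dict.empty
    (by intro k v h; simp [PySem.Dict.get?_empty] at h)]
  exact PySem.Dict.foldl_insert_getD_add_one_eq_counter xs

-- ===== VERDICT =====
theorem create_tf_query_spec : Claim_equal_create_tf_query := by
  intro xs _
  show create_tf_query xs = create_tf_query_alt xs
  unfold create_tf_query create_tf_query_alt
  rw [createTf_fold_eq_counter]
  have hkeys : ((PySem.Set.ofList xs).map
      (fun k => (k, ((xs.count k : Nat) : Int)))).map Prod.fst = PySem.Set.ofList xs := by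
    simp [List.map_map, Function.comp_def]
  simp [PySem.Dict.keys_counter, PySem.Dict.items_counter, PySem.List.count_eq, hkeys]
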